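-- pv_equiv track=rewrite | github.com/Gwizzlyy/cs405proj | dynamic_recursive_eliminate.py | can_empty
-- ===== SOURCE A (Python) =====
-- memory = {}
--
-- def can_empty(in_str):
--     # Memorization to reduce the need for recursion.
--     if not in_str:
--         return True
--     if in_str in memory:
--         return memory[in_str]
--     # Core Logic start
--     i = 0
--     can = False
--     while i < len(in_str) and not can:
--         j = i
--         # Check for consecutive a's or b's
--         while j + 1 < len(in_str) and in_str[j + 1] == in_str[i]:
--             j += 1
--         if j != i: # A block is spotted
--             can = can_empty(in_str[:i] + in_str[j + 1:]) # concatenate and call the function on new string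
--         i = j + 1
--
--     memory[in_str] = can # backtracking to stop recalculation of a seen combination.
--
--     return can
-- ===== SOURCE B (Python) =====
-- def can_empty(in_str):
--     # Iterative worklist (explicit stack) with a visited set instead of
--     # A's memoized recursion; same return value for every input.
--     stack = [in_str]
--     seen = set()
--     while stack:
--         s = stack.pop()
--         if not s:
--             return True
--         if s in seen:
--             continue
--         seen.add(s)
--         # push every string obtained by deleting one maximal run of length >= 2
--         prefix = ""
--         rest = s
--         while rest:
--             c = rest[0]
--             k = 1
--             while k < len(rest) and rest[k] == c:
--                 k += 1
--             if k >= 2: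
--                 stack.append(prefix + rest[k:])
--             prefix += rest[:k]
--             rest = rest[k:]
--     return False
-- ===== Notes on version B (the rewrite author's own statement) =====
-- stated objective: alternative
-- what changed: Replaced A's memoized recursion with an explicit iterative worklist (stack) plus a visited set, scanning each popped string once (prefix/rest split) to push every string obtained by deleting a maximal run of length >= 2; return value is identical (A's global memo dict side effect is not reproduced).
import Mathlib
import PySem

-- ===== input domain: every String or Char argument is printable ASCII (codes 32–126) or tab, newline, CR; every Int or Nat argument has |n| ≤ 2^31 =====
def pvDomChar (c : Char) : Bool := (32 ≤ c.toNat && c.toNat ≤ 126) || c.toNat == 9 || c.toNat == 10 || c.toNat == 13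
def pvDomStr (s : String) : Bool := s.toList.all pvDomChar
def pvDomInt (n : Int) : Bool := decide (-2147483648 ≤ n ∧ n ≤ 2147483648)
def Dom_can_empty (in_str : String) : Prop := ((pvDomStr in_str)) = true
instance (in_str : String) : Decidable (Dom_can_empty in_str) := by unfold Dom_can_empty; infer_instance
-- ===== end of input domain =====

-- B replaces A's memoized recursion by an explicit worklist + visited set (alternative
-- decomposition, same cost); A's global memo dict mutation is not reproduced — the
-- equivalence proved here is about the return value only.

-- ===== PORT A =====
-- A's inner while loop: extend j while in_str[j+1] == in_str[i]
def runEndA (s : List Char) (i j : Nat) : Nat :=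
  if h : j + 1 < s.length ∧ s.getD (j+1) ' ' = s.getD i ' ' then runEndA s i (j+1) else j
termination_by s.length - j
decreasing_by
  exact Nat.sub_succ_lt_self _ _ (Nat.lt_of_succ_lt h.1)

theorem runEndA_ge (s : List Char) (i j : Nat) : j ≤ runEndA s i j := by
  unfold runEndA
  split
  · rename_i h
    exact le_trans (Nat.le_succ j) (runEndA_ge s i (j+1))
  · exact le_refl j
termination_by s.length - j
decreasing_by
  rename_i h
  exact Nat.sub_succ_lt_self _ _ (Nat.lt_of_succ_lt h.1)

theorem canA_dec (s : List Char) (i : Nat) (h1 : i < s.length) :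
    (s.take i ++ s.drop (runEndA s i i + 1)).length < s.length := by
  have h2 := runEndA_ge s i i
  rw [List.length_append, List.length_take, List.length_drop,
    Nat.min_eq_left (Nat.le_of_lt h1)]
  have h3 : s.length - (runEndA s i i + 1) ≤ s.length - (i + 1) :=
    Nat.sub_le_sub_left (Nat.succ_le_succ h2) _
  have h4 : (i + 1) + (s.length - (i + 1)) = s.length :=
    Nat.add_sub_cancel' (Nat.succ_le_of_lt h1)
  calc i + (s.length - (runEndA s i i + 1))
      ≤ i + (s.length - (i + 1)) := Nat.add_le_add_left h3 i
    _ < (i + 1) + (s.length - (i + 1)) := Nat.add_lt_add_right (Nat.lt_succ_self i) _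
    _ = s.length := h4

theorem loopA_dec (s : List Char) (i : Nat) (h1 : i < s.length) :
    s.length - (runEndA s i i + 1) < s.length - i := by
  have h2 := runEndA_ge s i i
  exact Nat.lt_of_le_of_lt (Nat.sub_le_sub_left (Nat.succ_le_succ h2) _)
    (Nat.sub_succ_lt_self _ _ h1)

mutual
-- the recursive function with the memo dict threaded (Python's global `memory`)
def canA (s : List Char) (mem : PySem.Dict String Bool) : Bool × PySem.Dict String Bool :=
  if s = [] then (true, mem)
  else
    match mem.get? (String.ofList s) with
    | some b => (b, mem)
    | none =>
      let r := loopA s 0 false mem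
      (r.1, r.2.insert (String.ofList s) r.1)
termination_by (s.length, 1, 0)
decreasing_by
  exact Prod.Lex.right _ (Prod.Lex.left _ _ Nat.zero_lt_one)

-- A's outer while loop: i, can, and the memo threaded through
def loopA (s : List Char) (i : Nat) (can : Bool) (mem : PySem.Dict String Bool) :
    Bool × PySem.Dict String Bool :=
  if h : i < s.length ∧ can = false then
    let j := runEndA s i i
    let r := if j ≠ i then canA (s.take i ++ s.drop (j+1)) mem else (can, mem)
    loopA s (j+1) r.1 r.2
  else (can, mem)
termination_by (s.length, 0, s.length - i)
decreasing_by
  · exact Prod.Lex.left _ _ (canA_dec s i h.1)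
  · exact Prod.Lex.right _ (Prod.Lex.right _ (loopA_dec s i h.1))
end

def can_empty (in_str : String) : Bool := (canA in_str.toList PySem.Dict.empty).1

-- ===== PORT B =====
-- B's innermost while: count the leading run of c in rest, starting from k
def runK (rest : List Char) (c : Char) (k : Nat) : Nat :=
  if h : k < rest.length ∧ rest.getD k ' ' = c then runK rest c (k+1) else k
termination_by rest.length - k
decreasing_by
  exact Nat.sub_succ_lt_self _ _ h.1

theorem runK_ge (rest : List Char) (c : Char) (k : Nat) : k ≤ runK rest c k := by
  unfold runK
  split
  · rename_i h
    exact le_trans (Nat.le_succ k) (runK_ge rest c (k+1))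
  · exact le_refl k
termination_by rest.length - k
decreasing_by
  rename_i h
  exact Nat.sub_succ_lt_self _ _ h.1

theorem runK_le (rest : List Char) (c : Char) (k : Nat) (h : k ≤ rest.length) :
    runK rest c k ≤ rest.length := by
  unfold runK
  split
  · rename_i hc
    exact runK_le rest c (k+1) (Nat.succ_le_of_lt hc.1)
  · exact h
termination_by rest.length - k
decreasing_by
  rename_i hc
  exact Nat.sub_succ_lt_self _ _ hc.1

theorem succsScan_dec (rest : List Char) (hr : ¬ rest = []) :
    (rest.drop (runK rest (rest.head hr) 1)).length < rest.length := by
  have h1 := runK_ge rest (rest.head hr) 1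
  have h2 : 0 < rest.length := List.length_pos_of_ne_nil hr
  rw [List.length_drop]
  exact Nat.sub_lt h2 (Nat.lt_of_lt_of_le Nat.zero_lt_one h1)

-- B's middle while: walk (prefix, rest), collecting the pushed successor strings in push order
def succsScan (pre rest : List Char) : List (List Char) :=
  if hr : rest = [] then []
  else
    let c := rest.head hr
    let k := runK rest c 1
    let tail := succsScan (pre ++ rest.take k) (rest.drop k)
    if 2 ≤ k then (pre ++ rest.drop k) :: tail else tail
termination_by rest.length
decreasing_by
  exact succsScan_dec rest (by assumption)

-- the factorial sum of the successors is bounded (termination measure for bfsB)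
theorem succsScan_fact (pre rest : List Char) :
    ((succsScan pre rest).map (fun t => Nat.factorial (t.length + 1))).sum ≤
      rest.length * Nat.factorial (pre.length + rest.length - 1) := by
  unfold succsScan
  split
  · exact Nat.zero_le _
  · rename_i hr
    have hk1 := runK_ge rest (rest.head hr) 1
    have hlen1 : 0 < rest.length := List.length_pos_of_ne_nil hr
    have hkle := runK_le rest (rest.head hr) 1 hlen1
    set k := runK rest (rest.head hr) 1 with hkdef
    have ih := succsScan_fact (pre ++ rest.take k) (rest.drop k)
    rw [List.length_append, List.length_take, List.length_drop,
      Nat.min_eq_left hkle, Nat.add_assoc, Nat.add_sub_cancel' hkle] at ih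
    by_cases h2 : 2 ≤ k
    · rw [if_pos h2, List.map_cons, List.sum_cons]
      have hl2 : 2 ≤ rest.length := le_trans h2 hkle
      have hhead : (pre ++ rest.drop k).length + 1 ≤ pre.length + rest.length - 1 := by
        rw [List.length_append, List.length_drop,
          Nat.add_sub_assoc (le_trans (Nat.le_succ 1) hl2), Nat.add_assoc]
        refine Nat.add_le_add_left ?_ pre.length
        have h3 : rest.length - k ≤ rest.length - 2 := Nat.sub_le_sub_left h2 _
        have h4 : rest.length - 2 + 1 ≤ rest.length - 1 := by
          rw [show (2:Nat) = 1 + 1 from rfl, ← Nat.sub_sub]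
          exact Nat.le_of_eq (Nat.succ_pred_eq_of_pos (Nat.lt_sub_of_add_lt (a := 0) (b := 1) (by exact hl2)))
        exact le_trans (Nat.add_le_add_right h3 1) h4
      have h1 := Nat.factorial_le hhead
      refine le_trans (Nat.add_le_add h1 ih) ?_
      have hdistr : Nat.factorial (pre.length + rest.length - 1)
            + (rest.length - k) * Nat.factorial (pre.length + rest.length - 1)
          = (1 + (rest.length - k)) * Nat.factorial (pre.length + rest.length - 1) := by
        ring
      rw [hdistr]
      refine Nat.mul_le_mul_right _ ?_
      rw [Nat.add_comm]
      exact Nat.succ_le_of_lt (Nat.sub_lt hlen1 (Nat.lt_of_lt_of_le Nat.zero_lt_two h2))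
    · rw [if_neg h2]
      exact le_trans ih (Nat.mul_le_mul_right _ (Nat.sub_le _ _))
termination_by rest.length
decreasing_by
  exact succsScan_dec rest (by assumption)

-- termination measure for the worklist: sum of (|s|+1)! over the stack
def wMeasure (st : List (List Char)) : Nat := (st.map (fun s => Nat.factorial (s.length + 1))).sum

-- cost of skipping an already-seen state
theorem wMeasure_skip (s : List Char) (rest : List (List Char)) :
    wMeasure rest < wMeasure (s :: rest) := by
  unfold wMeasure
  rw [List.map_cons, List.sum_cons]
  have := Nat.factorial_pos (s.length + 1)
  omega

-- cost of expanding an unseen non-empty state into its successors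
theorem wMeasure_expand (s : List Char) (rest : List (List Char)) (hs : s ≠ []) :
    wMeasure ((succsScan [] s).reverse ++ rest) < wMeasure (s :: rest) := by
  have hL : 0 < s.length := List.length_pos_of_ne_nil hs
  have hsum := succsScan_fact [] s
  simp only [List.length_nil, Nat.zero_add] at hsum
  have hfac : s.length * Nat.factorial (s.length - 1) = Nat.factorial s.length := by
    obtain ⟨m, hm⟩ : ∃ m, s.length = m + 1 := ⟨s.length - 1, (Nat.succ_pred_eq_of_pos hL).symm⟩
    rw [hm, Nat.succ_sub_one]
    exact (Nat.factorial_succ m).symm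
  rw [hfac] at hsum
  have hlt : Nat.factorial s.length < Nat.factorial (s.length + 1) :=
    (Nat.factorial_lt hL).mpr (Nat.lt_succ_self _)
  unfold wMeasure
  rw [List.map_append, List.sum_append, List.map_cons, List.sum_cons, List.map_reverse,
    List.sum_reverse]
  exact Nat.add_lt_add_right (Nat.lt_of_le_of_lt hsum hlt) _

-- B's outer while loop over the worklist (Python pops from the END; head of this list is the top)
def bfsB (stack : List (List Char)) (seen : PySem.Set String) : Bool :=
  match stack with
  | [] => false
  | s :: rest =>
    if s = [] then true
    else if PySem.Set.contains seen (String.ofList s) then bfsB rest seen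
    else bfsB ((succsScan [] s).reverse ++ rest) (PySem.Set.add seen (String.ofList s))
termination_by wMeasure stack
decreasing_by
  · exact wMeasure_skip s rest
  · exact wMeasure_expand s rest (by assumption)

def can_empty_alt (in_str : String) : Bool := bfsB [in_str.toList] PySem.Set.empty

-- ===== PRECONDITION & SPEC =====
def Spec_can_empty (in_str : String) (out : Bool) : Prop := out = can_empty_alt in_str
instance (in_str : String) (out : Bool) : Decidable (Spec_can_empty in_str out) := by unfold Spec_can_empty; infer_instance

-- ===== CLAIM (what is proved, stated in full; the proofs are below) =====
def Claim_equal_can_empty : Prop := ∀ (in_str : String), Dom_can_empty in_str → Spec_can_empty in_str (can_empty in_str)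

-- ===== LEMMAS AND PROOFS =====

theorem runEndA_lt (s : List Char) (i j : Nat) (h : j < s.length) : runEndA s i j < s.length := by
  unfold runEndA
  split
  · exact runEndA_lt s i (j+1) (by omega)
  · exact h
termination_by s.length - j

-- every successor of (pre, rest) drops at least 2 characters
theorem succsScan_len (pre rest : List Char) :
    ∀ t ∈ succsScan pre rest, t.length + 2 ≤ pre.length + rest.length := by
  unfold succsScan
  split
  · simp
  · rename_i hr
    intro t ht
    have hk1 := runK_ge rest (rest.head hr) 1
    have hlen1 : rest.length ≠ 0 := fun h0 => hr (List.eq_nil_of_length_eq_zero h0)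
    have hkle := runK_le rest (rest.head hr) 1 (by omega)
    set k := runK rest (rest.head hr) 1 with hkdef
    have ih := succsScan_len (pre ++ rest.take k) (rest.drop k)
    rw [List.length_append, List.length_take, List.length_drop] at ih
    by_cases h2 : 2 ≤ k
    · rw [if_pos h2] at ht
      rcases List.mem_cons.mp ht with rfl | ht
      · rw [List.length_append, List.length_drop]
        omega
      · have := ih t ht; omega
    · rw [if_neg h2] at ht
      have := ih t ht; omega
termination_by rest.length
decreasing_by
  exact succsScan_dec rest (by assumption)

-- length of the leading run of characters equal to x
def cntEq (x : Char) (l : List Char) : Nat := (l.takeWhile (fun ch => ch == x)).length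

theorem cntEq_nil (x : Char) : cntEq x [] = 0 := rfl

theorem cntEq_cons_pos (x a : Char) (l : List Char) (h : a = x) :
    cntEq x (a :: l) = cntEq x l + 1 := by
  simp [cntEq, List.takeWhile, h]

theorem cntEq_cons_neg (x a : Char) (l : List Char) (h : a ≠ x) :
    cntEq x (a :: l) = 0 := by
  have hb : (a == x) = false := by simpa using h
  simp [cntEq, List.takeWhile, hb]

-- A's inner while loop counts the run of in_str[i] past position j
theorem runEndA_eq (s : List Char) (i j : Nat) :
    runEndA s i j = j + cntEq (s.getD i ' ') (s.drop (j+1)) := by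
  unfold runEndA
  split
  · rename_i h
    obtain ⟨h1, h2⟩ := h
    rw [runEndA_eq s i (j+1)]
    rw [List.drop_eq_getElem_cons h1, cntEq_cons_pos _ _ _ (by rw [← List.getD_eq_getElem s ' ' h1]; exact h2)]
    omega
  · rename_i h
    by_cases hlt : j + 1 < s.length
    · have hne : s.getD (j+1) ' ' ≠ s.getD i ' ' := fun hc => h ⟨hlt, hc⟩
      rw [List.drop_eq_getElem_cons hlt, cntEq_cons_neg _ _ _ (by rw [← List.getD_eq_getElem s ' ' hlt]; exact hne)]
      omega
    · rw [List.drop_eq_nil_of_le (by omega), cntEq_nil]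
      omega
termination_by s.length - j


-- B's innermost while loop counts the run of c past position k
theorem runK_eq (rest : List Char) (c : Char) (k : Nat) :
    runK rest c k = k + cntEq c (rest.drop k) := by
  unfold runK
  split
  · rename_i h
    obtain ⟨h1, h2⟩ := h
    rw [runK_eq rest c (k+1)]
    rw [List.drop_eq_getElem_cons h1, cntEq_cons_pos _ _ _ (by rw [← List.getD_eq_getElem rest ' ' h1]; exact h2)]
    omega
  · rename_i h
    by_cases hlt : k < rest.length
    · have hne : rest.getD k ' ' ≠ c := fun hc => h ⟨hlt, hc⟩
      rw [List.drop_eq_getElem_cons hlt, cntEq_cons_neg _ _ _ (by rw [← List.getD_eq_getElem rest ' ' hlt]; exact hne)]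
      omega
    · rw [List.drop_eq_nil_of_le (by omega), cntEq_nil]
      omega
termination_by rest.length - k

-- reference predicate: s can be emptied (pure recursion over B's successor enumeration)
def canP (s : List Char) : Bool :=
  if s = [] then true else (succsScan [] s).attach.any (fun t => canP t.1)
termination_by s.length
decreasing_by
  have := succsScan_len [] s t.1 t.2
  simp only [List.length_nil] at this
  omega

theorem canP_nil : canP [] = true := by rw [canP]; simp

theorem canP_ne (s : List Char) (hs : s ≠ []) : canP s = (succsScan [] s).any canP := by
  rw [canP]
  simp only [hs, if_false]
  simp only [List.any_eq]
  apply decide_eq_decide.mpr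
  constructor
  · rintro ⟨⟨t, ht⟩, -, h⟩; exact ⟨t, ht, h⟩
  · rintro ⟨t, ht, h⟩; exact ⟨⟨t, ht⟩, List.mem_attach _ _, h⟩

-- pure version of A's outer while loop (the memo stripped away)
def anyFromA (s : List Char) (i : Nat) : Bool :=
  if h : i < s.length then
    (if runEndA s i i ≠ i then canP (s.take i ++ s.drop (runEndA s i i + 1)) else false)
      || anyFromA s (runEndA s i i + 1)
  else false
termination_by s.length - i
decreasing_by
  have h1 := runEndA_ge s i i
  omega

-- the bridge: A's scan from position i enumerates exactly B's successors of (take i, drop i)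
theorem anyFromA_eq (s : List Char) (i : Nat) (hi : i ≤ s.length) :
    anyFromA s i = (succsScan (s.take i) (s.drop i)).any canP := by
  rw [anyFromA]
  by_cases h : i < s.length
  · rw [dif_pos h]
    have hji := runEndA_ge s i i
    have hjlt := runEndA_lt s i i h
    have hrest : s.drop i ≠ [] := by
      intro heq
      have := congrArg List.length heq
      simp only [List.length_drop, List.length_nil] at this
      omega
    rw [succsScan, dif_neg hrest]
    have hhead : (s.drop i).head hrest = s[i]'h := List.head_drop hrest
    have hk : runK (s.drop i) ((s.drop i).head hrest) 1 = runEndA s i i + 1 - i := by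
      rw [runK_eq, runEndA_eq, hhead]
      rw [List.drop_drop]
      rw [List.getD_eq_getElem s ' ' h]
      omega
    have hdropdrop : (s.drop i).drop (runEndA s i i + 1 - i) = s.drop (runEndA s i i + 1) := by
      rw [List.drop_drop]
      congr 1
      omega
    have htake : s.take i ++ (s.drop i).take (runEndA s i i + 1 - i) = s.take (runEndA s i i + 1) := by
      rw [← List.take_add]
      congr 1
      omega
    have hih := anyFromA_eq s (runEndA s i i + 1) (by omega)
    simp only [hk, hdropdrop, htake]
    by_cases hne : runEndA s i i ≠ i
    · rw [if_pos hne, if_pos (by omega)]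
      simp only [List.any_cons]
      rw [hih]
    · rw [if_neg hne, if_neg (by omega)]
      rw [hih]
      simp
  · rw [dif_neg h]
    have : s.drop i = [] := List.drop_eq_nil_of_le (by omega)
    rw [this, succsScan]
    simp
termination_by s.length - i
decreasing_by
  have h1 := runEndA_ge s i i
  omega

theorem canP_eq_anyFromA (s : List Char) (hs : s ≠ []) : canP s = anyFromA s 0 := by
  rw [canP_ne s hs, anyFromA_eq s 0 (by omega)]
  simp

-- the memo dict only ever holds correct values
def GoodMem (mem : PySem.Dict String Bool) : Prop :=
  ∀ (k : String) (b : Bool), mem.get? k = some b → b = canP k.toList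

theorem goodMem_empty : GoodMem PySem.Dict.empty := by
  intro k b h
  simp [PySem.Dict.empty, PySem.Dict.get?] at h

-- A's outer loop, with a correct memo, computes `can || anyFromA s i` and keeps the memo correct
theorem loopA_eq (s : List Char)
    (H : ∀ t mem, t.length < s.length → GoodMem mem →
      (canA t mem).1 = canP t ∧ GoodMem (canA t mem).2)
    (i : Nat) (can : Bool) (mem : PySem.Dict String Bool) (hg : GoodMem mem) :
    (loopA s i can mem).1 = (can || anyFromA s i) ∧ GoodMem (loopA s i can mem).2 := by
  rw [loopA]
  by_cases h : i < s.length ∧ can = false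
  · rw [dif_pos h]
    obtain ⟨h1, h2⟩ := h
    subst h2
    have hji := runEndA_ge s i i
    have hA0 : anyFromA s i =
        ((if runEndA s i i ≠ i then canP (s.take i ++ s.drop (runEndA s i i + 1)) else false)
          || anyFromA s (runEndA s i i + 1)) := by
      rw [anyFromA, dif_pos h1]
    by_cases hne : runEndA s i i ≠ i
    · simp only [if_pos hne]
      have hlen : (s.take i ++ s.drop (runEndA s i i + 1)).length < s.length := by
        simp only [List.length_append, List.length_take, List.length_drop]
        omega
      have hAcall := H _ mem hlen hg
      have hrec := loopA_eq s H (runEndA s i i + 1)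
        (canA (s.take i ++ s.drop (runEndA s i i + 1)) mem).1
        (canA (s.take i ++ s.drop (runEndA s i i + 1)) mem).2 hAcall.2
      refine ⟨?_, hrec.2⟩
      rw [hrec.1, hAcall.1, hA0, if_pos hne]
      simp
    · simp only [if_neg hne]
      have hrec := loopA_eq s H (runEndA s i i + 1) false mem hg
      refine ⟨?_, hrec.2⟩
      rw [hrec.1, hA0, if_neg hne]
      simp
  · rw [dif_neg h]
    refine ⟨?_, hg⟩
    by_cases hc : can = true
    · subst hc; simp
    · have hc' : can = false := by revert hc; cases can <;> simp
      subst hc'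
      have hil : ¬ i < s.length := fun hlt => h ⟨hlt, rfl⟩
      rw [anyFromA, dif_neg hil]
      simp
termination_by s.length - i
decreasing_by
  all_goals
    have h1 := runEndA_ge s i i
    omega

-- A's recursion computes canP and keeps the memo correct
theorem canA_eq (s : List Char) (mem : PySem.Dict String Bool) (hg : GoodMem mem) :
    (canA s mem).1 = canP s ∧ GoodMem (canA s mem).2 := by
  rw [canA]
  by_cases hs : s = []
  · rw [if_pos hs]
    subst hs
    exact ⟨canP_nil.symm, hg⟩
  · rw [if_neg hs]
    cases hmem : mem.get? (String.ofList s) with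
    | some b =>
      simp only [hmem]
      refine ⟨?_, hg⟩
      have := hg _ _ hmem
      simpa using this
    | none =>
      simp only [hmem]
      have H : ∀ t mem', t.length < s.length → GoodMem mem' →
          (canA t mem').1 = canP t ∧ GoodMem (canA t mem').2 := by
        intro t mem' ht hg'
        exact canA_eq t mem' hg'
      have hl := loopA_eq s H 0 false mem hg
      have hval : (loopA s 0 false mem).1 = canP s := by
        rw [hl.1, canP_eq_anyFromA s hs]
        simp
      refine ⟨hval, ?_⟩
      intro k b hk
      by_cases hks : k = String.ofList s
      · subst hks
        rw [PySem.Dict.get?_insert_self] at hk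
        cases hk
        rw [hval]
        simp
      · rw [PySem.Dict.get?_insert_of_ne _ _ hks] at hk
        exact hl.2 k b hk
termination_by s.length
decreasing_by
  exact ht

-- if the worklist search answers True, some stack element (or seen string) can be emptied
theorem bfsB_true (stack : List (List Char)) (seen : PySem.Set String)
    (h : bfsB stack seen = true) :
    (∃ s ∈ stack, canP s = true) ∨ (∃ k ∈ seen, canP k.toList = true) := by
  suffices main : ∀ (n : Nat) (stack : List (List Char)) (seen : PySem.Set String),
      wMeasure stack ≤ n → bfsB stack seen = true →
      (∃ s ∈ stack, canP s = true) ∨ (∃ k ∈ seen, canP k.toList = true) from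
    main (wMeasure stack) stack seen le_rfl h
  intro n
  induction n with
  | zero =>
    intro stack seen hm h
    cases stack with
    | nil => rw [bfsB] at h; cases h
    | cons s rest =>
      exfalso
      have := wMeasure_skip s rest
      omega
  | succ m ih =>
    intro stack seen hm h
    cases stack with
    | nil => rw [bfsB] at h; cases h
    | cons s rest =>
      rw [bfsB] at h
      by_cases hs : s = []
      · exact Or.inl ⟨s, List.mem_cons_self, by rw [hs]; exact canP_nil⟩
      · rw [if_neg hs] at h
        by_cases hseen : PySem.Set.contains seen (String.ofList s) = true
        · rw [if_pos hseen] at h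
          have hm' : wMeasure rest ≤ m := by have := wMeasure_skip s rest; omega
          rcases ih rest seen hm' h with ⟨x, hx, hc⟩ | hr
          · exact Or.inl ⟨x, List.mem_cons_of_mem s hx, hc⟩
          · exact Or.inr hr
        · rw [if_neg hseen] at h
          have hm' : wMeasure ((succsScan [] s).reverse ++ rest) ≤ m := by
            have := wMeasure_expand s rest hs
            omega
          rcases ih _ _ hm' h with ⟨x, hx, hc⟩ | ⟨k, hk, hc⟩
          · rw [List.mem_append, List.mem_reverse] at hx
            rcases hx with hx | hx
            · refine Or.inl ⟨s, List.mem_cons_self, ?_⟩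
              rw [canP_ne s hs, List.any_eq_true]
              exact ⟨x, hx, hc⟩
            · exact Or.inl ⟨x, List.mem_cons_of_mem s hx, hc⟩
          · rw [PySem.Set.mem_add] at hk
            rcases hk with hk | hk
            · exact Or.inr ⟨k, hk, hc⟩
            · subst hk
              refine Or.inl ⟨s, List.mem_cons_self, ?_⟩
              simpa using hc

-- a non-empty, successor-closed set of strings contains no emptiable string
theorem closed_false (seen : List String)
    (hne : ∀ k ∈ seen, k.toList ≠ [])
    (hcl : ∀ k ∈ seen, ∀ t ∈ succsScan [] k.toList, String.ofList t ∈ seen) :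
    ∀ k ∈ seen, canP k.toList = false := by
  have main : ∀ (n : Nat) (k : String), k ∈ seen → k.toList.length ≤ n → canP k.toList = false := by
    intro n
    induction n with
    | zero =>
      intro k hk hlen
      exact absurd (List.eq_nil_of_length_eq_zero (by omega)) (hne k hk)
    | succ m ih =>
      intro k hk hlen
      rw [canP_ne _ (hne k hk), List.any_eq_false]
      intro t ht
      have hmem := hcl k hk t ht
      have hlt := succsScan_len [] k.toList t ht
      simp only [List.length_nil, Nat.zero_add] at hlt
      have := ih (String.ofList t) hmem (by simpa using (by omega : t.length ≤ m))
      simpa using this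
  exact fun k hk => main k.toList.length k hk le_rfl

-- if the worklist search answers False, nothing in the stack (or in seen) can be emptied,
-- provided every seen string is non-empty and each of its successors was pushed or already seen
theorem bfsB_false (stack : List (List Char)) (seen : PySem.Set String)
    (hne : ∀ k ∈ seen, k.toList ≠ [])
    (hinv : ∀ k ∈ seen, ∀ t ∈ succsScan [] k.toList, String.ofList t ∈ seen ∨ t ∈ stack)
    (h : bfsB stack seen = false) :
    ∀ s, (s ∈ stack ∨ String.ofList s ∈ seen) → canP s = false := by
  suffices main : ∀ (n : Nat) (stack : List (List Char)) (seen : PySem.Set String),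
      wMeasure stack ≤ n →
      (∀ k ∈ seen, k.toList ≠ []) →
      (∀ k ∈ seen, ∀ t ∈ succsScan [] k.toList, String.ofList t ∈ seen ∨ t ∈ stack) →
      bfsB stack seen = false →
      ∀ s, (s ∈ stack ∨ String.ofList s ∈ seen) → canP s = false from
    main (wMeasure stack) stack seen le_rfl hne hinv h
  clear hne hinv h
  intro n
  induction n with
  | zero =>
    intro stack seen hm hne hinv h
    cases stack with
    | nil =>
      intro s hs
      have hcl : ∀ k ∈ seen, ∀ t ∈ succsScan [] k.toList, String.ofList t ∈ seen := by
        intro k hk t ht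
        rcases hinv k hk t ht with hx | hx
        · exact hx
        · cases hx
      rcases hs with hs | hs
      · cases hs
      · have := closed_false seen hne hcl (String.ofList s) hs
        simpa using this
    | cons s rest =>
      exfalso
      have := wMeasure_skip s rest
      omega
  | succ m ih =>
    intro stack seen hm hne hinv h
    cases stack with
    | nil =>
      intro s hs
      have hcl : ∀ k ∈ seen, ∀ t ∈ succsScan [] k.toList, String.ofList t ∈ seen := by
        intro k hk t ht
        rcases hinv k hk t ht with hx | hx
        · exact hx
        · cases hx
      rcases hs with hs | hs
      · cases hs
      · have := closed_false seen hne hcl (String.ofList s) hs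
        simpa using this
    | cons s rest =>
      rw [bfsB] at h
      by_cases hs : s = []
      · rw [if_pos hs] at h; cases h
      · rw [if_neg hs] at h
        by_cases hseen : PySem.Set.contains seen (String.ofList s) = true
        · rw [if_pos hseen] at h
          have hsin : String.ofList s ∈ seen := (PySem.Set.contains_iff seen _).mp hseen
          have hinv' : ∀ k ∈ seen, ∀ t ∈ succsScan [] k.toList,
              String.ofList t ∈ seen ∨ t ∈ rest := by
            intro k hk t ht
            rcases hinv k hk t ht with hx | hx
            · exact Or.inl hx
            · rcases List.mem_cons.mp hx with rfl | hx
              · exact Or.inl hsin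
              · exact Or.inr hx
          have hm' : wMeasure rest ≤ m := by have := wMeasure_skip s rest; omega
          have ihall := ih rest seen hm' hne hinv' h
          intro x hx
          rcases hx with hx | hx
          · rcases List.mem_cons.mp hx with rfl | hx
            · exact ihall x (Or.inr hsin)
            · exact ihall x (Or.inl hx)
          · exact ihall x (Or.inr hx)
        · rw [if_neg hseen] at h
          have hne' : ∀ k ∈ PySem.Set.add seen (String.ofList s), k.toList ≠ [] := by
            intro k hk
            rcases (PySem.Set.mem_add seen _ k).mp hk with hk | hk
            · exact hne k hk
            · subst hk; simpa using hs
          have hinv' : ∀ k ∈ PySem.Set.add seen (String.ofList s),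
              ∀ t ∈ succsScan [] k.toList,
                String.ofList t ∈ PySem.Set.add seen (String.ofList s) ∨
                  t ∈ (succsScan [] s).reverse ++ rest := by
            intro k hk t ht
            rcases (PySem.Set.mem_add seen _ k).mp hk with hk | hk
            · rcases hinv k hk t ht with hx | hx
              · exact Or.inl ((PySem.Set.mem_add seen _ _).mpr (Or.inl hx))
              · rcases List.mem_cons.mp hx with rfl | hx
                · exact Or.inl ((PySem.Set.mem_add seen _ _).mpr (Or.inr rfl))
                · exact Or.inr (List.mem_append.mpr (Or.inr hx))
            · subst hk
              simp only [String.toList_ofList] at ht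
              exact Or.inr (List.mem_append.mpr (Or.inl (List.mem_reverse.mpr ht)))
          have hm' : wMeasure ((succsScan [] s).reverse ++ rest) ≤ m := by
            have := wMeasure_expand s rest hs
            omega
          have ihall := ih _ _ hm' hne' hinv' h
          intro x hx
          rcases hx with hx | hx
          · rcases List.mem_cons.mp hx with rfl | hx
            · exact ihall x (Or.inr ((PySem.Set.mem_add seen _ _).mpr (Or.inr rfl)))
            · exact ihall x (Or.inl (List.mem_append.mpr (Or.inr hx)))
          · exact ihall x (Or.inr ((PySem.Set.mem_add seen _ _).mpr (Or.inl hx)))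

-- B equals the reference predicate
theorem alt_eq (s : List Char) : bfsB [s] PySem.Set.empty = canP s := by
  cases hb : bfsB [s] PySem.Set.empty with
  | true =>
    rcases bfsB_true [s] PySem.Set.empty hb with ⟨x, hx, hc⟩ | ⟨k, hk, -⟩
    · rcases List.mem_cons.mp hx with rfl | hx
      · exact hc.symm
      · cases hx
    · cases hk
  | false =>
    have := bfsB_false [s] PySem.Set.empty (by intro k hk; cases hk)
      (by intro k hk; cases hk) hb s (Or.inl List.mem_cons_self)
    exact this.symm

-- ===== VERDICT (by name: the statement is the Claim_ definition above) =====
theorem can_empty_spec : Claim_equal_can_empty := by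
  intro in_str _
  unfold Spec_can_empty can_empty can_empty_alt
  rw [alt_eq, (canA_eq in_str.toList PySem.Dict.empty goodMem_empty).1]
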